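-- pv_equiv track=rewrite | github.com/KlaraVarm/recommendation_system | recommendation_system.py | sum_u1_u2
-- ===== SOURCE A (Python) =====
-- def sum_u1_u2(u1, u2):
--     sum_users = 0
--
--     for item, interaction in u2.items():
--         if item in u1 and interaction == u1[item]:
--             sum_users += 1
--         else:
--             continue
--
--     return sum_users
-- ===== SOURCE B (Python) =====
-- def sum_u1_u2(u1, u2):
--     a = sorted(u1.items(), key=lambda kv: kv[0])
--     b = sorted(u2.items(), key=lambda kv: kv[0])
--     i = j = count = 0
--     while i < len(a) and j < len(b):
--         ka, va = a[i]
--         kb, vb = b[j]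
--         if ka < kb:
--             i += 1
--         elif kb < ka:
--             j += 1
--         else:
--             if va == vb:
--                 count += 1
--             i += 1
--             j += 1
--     return count
-- ===== Notes on version B (the rewrite author's own statement) =====
-- stated objective: alternative
-- what changed: Replaces A's hash-lookup scan with a sort-merge join: both dicts' items are sorted by key and a two-pointer merge counts the keys present in both with equal values.
import Mathlib
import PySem

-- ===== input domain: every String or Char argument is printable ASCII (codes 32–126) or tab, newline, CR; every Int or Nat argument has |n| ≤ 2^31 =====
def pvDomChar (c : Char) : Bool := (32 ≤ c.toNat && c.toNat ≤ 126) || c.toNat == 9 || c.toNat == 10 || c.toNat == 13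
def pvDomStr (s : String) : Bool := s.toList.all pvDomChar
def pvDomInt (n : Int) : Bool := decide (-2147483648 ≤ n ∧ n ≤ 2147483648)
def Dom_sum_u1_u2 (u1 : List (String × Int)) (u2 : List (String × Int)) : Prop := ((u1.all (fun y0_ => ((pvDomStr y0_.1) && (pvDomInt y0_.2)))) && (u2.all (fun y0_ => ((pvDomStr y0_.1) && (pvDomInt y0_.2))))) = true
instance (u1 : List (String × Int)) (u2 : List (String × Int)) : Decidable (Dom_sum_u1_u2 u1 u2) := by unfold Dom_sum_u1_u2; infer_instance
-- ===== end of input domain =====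

-- B replaces A's hash-lookup scan with a sort-merge join over key-sorted item lists (alternative algorithm; not faster).


-- ===== PORT A =====
-- A scans u2's items and, for each, looks the key up in u1 and compares the values.
def sum_u1_u2 (u1 : List (String × Int)) (u2 : List (String × Int)) : Int :=
  ((PySem.Dict.mk u2).items).foldl
    (fun sum_users iv =>
      if ((PySem.Dict.mk u1).contains iv.1 && ((PySem.Dict.mk u1).get? iv.1 == some iv.2)) then
        sum_users + 1
      else
        sum_users)
    0

-- ===== PORT B =====
-- B's while loop over the two key-sorted item lists: advance the side with the
-- smaller key; on equal keys compare values and advance both.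
def pvMerge : List (String × Int) → List (String × Int) → Int
  | [], _ => 0
  | _ :: _, [] => 0
  | (ka, va) :: as_, (kb, vb) :: bs =>
    if ka < kb then pvMerge as_ ((kb, vb) :: bs)
    else if kb < ka then pvMerge ((ka, va) :: as_) bs
    else (if va = vb then 1 else 0) + pvMerge as_ bs
termination_by a b => a.length + b.length

def sum_u1_u2_alt (u1 : List (String × Int)) (u2 : List (String × Int)) : Int :=
  pvMerge (PySem.List.sorted ((PySem.Dict.mk u1).items) (fun kv => kv.1))
          (PySem.List.sorted ((PySem.Dict.mk u2).items) (fun kv => kv.1))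

-- ===== PRECONDITION & SPEC =====
-- Pre_ excludes association lists with duplicate keys: such a list does not represent any
-- Python dict (dict construction collapses duplicates), so the corner is a representation
-- artefact, not an input A's Python ever sees.
def Pre_sum_u1_u2 (u1 : List (String × Int)) (u2 : List (String × Int)) : Prop :=
  (u1.map Prod.fst).Nodup ∧ (u2.map Prod.fst).Nodup
instance (u1 : List (String × Int)) (u2 : List (String × Int)) : Decidable (Pre_sum_u1_u2 u1 u2) := by
  unfold Pre_sum_u1_u2; infer_instance
def pvWitness_sum_u1_u2 : (List (String × Int)) × (List (String × Int)) :=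
  ([("a", 1), ("b", 2)], [("a", 1), ("c", 3)])

def Spec_sum_u1_u2 (u1 : List (String × Int)) (u2 : List (String × Int)) (out : Int) : Prop := out = sum_u1_u2_alt u1 u2
instance (u1 : List (String × Int)) (u2 : List (String × Int)) (out : Int) : Decidable (Spec_sum_u1_u2 u1 u2 out) := by unfold Spec_sum_u1_u2; infer_instance

-- ===== CLAIM (what is proved, stated in full; the proofs are below) =====
def Claim_equal_sum_u1_u2 : Prop := ∀ (u1 : List (String × Int)) (u2 : List (String × Int)), Dom_sum_u1_u2 u1 u2 → Pre_sum_u1_u2 u1 u2 → Spec_sum_u1_u2 u1 u2 (sum_u1_u2 u1 u2)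

-- ===== LEMMAS AND PROOFS =====

-- Under nodup keys of u1, A's loop condition on a pair iv is exactly "iv is an item of u1".
lemma cond_eq_mem (u1 : List (String × Int)) (h1 : (u1.map Prod.fst).Nodup)
    (iv : String × Int) :
    ((PySem.Dict.mk u1).contains iv.1 && ((PySem.Dict.mk u1).get? iv.1 == some iv.2))
      = decide (iv ∈ u1) := by
  have hk : (PySem.Dict.mk u1).keys.Nodup := by simpa [PySem.Dict.keys] using h1
  have hiff := PySem.Dict.get?_eq_some_iff_mem_items (PySem.Dict.mk u1) iv.1 iv.2 hk
  rw [PySem.Dict.contains_eq_isSome_get?]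
  rcases hg : (PySem.Dict.mk u1).get? iv.1 with _ | v
  · have hm : iv ∉ u1 := fun hm => by
      have := hiff.2 (by simpa using hm)
      rw [hg] at this; simp at this
    simp [hm]
  · by_cases hm : iv ∈ u1
    · have := hiff.2 (by simpa using hm)
      rw [hg] at this
      injection this with hv
      simp [hv, hm]
    · have hne : v ≠ iv.2 := fun he => hm (by simpa using hiff.1 (by rw [hg, he]))
      simp [hm, hne]

-- A list pairwise-≤ on keys whose keys are nodup is pairwise-< on keys.
lemma chain_of_le_nodup (xs : List (String × Int))
    (hle : xs.Pairwise (fun p q => p.1 ≤ q.1))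
    (hnd : (xs.map Prod.fst).Nodup) :
    xs.Pairwise (fun p q => p.1 < q.1) := by
  have hne : xs.Pairwise (fun p q => p.1 ≠ q.1) := by
    rw [List.nodup_iff_pairwise_ne, List.pairwise_map] at hnd
    exact hnd
  exact (hle.and hne).imp (fun h => lt_of_le_of_ne h.1 h.2)

-- The merge of two key-strictly-increasing lists counts the items of B that occur in A.
lemma pvMerge_count (A B : List (String × Int))
    (hA : A.Pairwise (fun p q => p.1 < q.1))
    (hB : B.Pairwise (fun p q => p.1 < q.1)) :
    pvMerge A B = (B.countP (fun x => decide (x ∈ A)) : Int) := by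
  induction A, B using pvMerge.induct with
  | case1 B => simp [pvMerge]
  | case2 a as_ => simp [pvMerge]
  | case3 ka va as_ kb vb bs hlt ih =>
    have hnB : ∀ y ∈ (kb, vb) :: bs, y ≠ (ka, va) := by
      intro y hy he
      have hky : kb ≤ y.1 := by
        rcases List.mem_cons.1 hy with h | h
        · simp [h]
        · exact le_of_lt ((List.pairwise_cons.1 hB).1 y h)
      rw [he] at hky
      exact absurd hlt (not_lt.2 hky)
    rw [pvMerge, if_pos hlt, ih (List.pairwise_cons.1 hA).2 hB]
    congr 1
    apply List.countP_congr
    intro y hy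
    simp [hnB y hy]
  | case4 ka va as_ kb vb bs h1 hlt ih =>
    have hnb : (kb, vb) ∉ (ka, va) :: as_ := by
      intro hm
      rcases List.mem_cons.1 hm with h | h
      · have hk : kb = ka := congrArg Prod.fst h
        exact absurd (hk ▸ hlt) (lt_irrefl _)
      · have hlt2 := (List.pairwise_cons.1 hA).1 _ h
        exact absurd (lt_trans hlt hlt2) (lt_irrefl _)
    rw [pvMerge, if_neg h1, if_pos hlt, ih hA (List.pairwise_cons.1 hB).2]
    simp [List.countP_cons]
    constructor
    · intro hk
      exact absurd (hk ▸ hlt) (lt_irrefl _)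
    · intro hm
      exact hnb (List.mem_cons_of_mem _ hm)
  | case5 ka va as_ kb vb bs h1 h2 ih =>
    have hk : ka = kb := le_antisymm (not_lt.1 h2) (not_lt.1 h1)
    subst hk
    have hAt := (List.pairwise_cons.1 hA).1
    have hBt := (List.pairwise_cons.1 hB).1
    rw [pvMerge, if_neg h1, if_neg h2,
        ih (List.pairwise_cons.1 hA).2 (List.pairwise_cons.1 hB).2]
    have hcount : bs.countP (fun x => decide (x ∈ as_))
        = bs.countP (fun x => decide (x ∈ (ka, va) :: as_)) := by
      apply List.countP_congr
      intro y hy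
      have hne : y ≠ (ka, va) := by
        intro he
        have := hBt y hy
        rw [he] at this
        exact absurd this (lt_irrefl _)
      simp [hne]
    have hmem : ((ka, vb) ∈ (ka, va) :: as_) ↔ va = vb := by
      constructor
      · intro hm
        rcases List.mem_cons.1 hm with h | h
        · exact (congrArg Prod.snd h).symm
        · have := hAt _ h
          exact absurd this (lt_irrefl _)
      · intro hv
        rw [hv]
        exact List.mem_cons_self ..
    rw [List.countP_cons, ← hcount]
    by_cases hv : va = vb
    · simp [hv]
      ring
    · simp [hv]
      refine ⟨fun he => hv he.symm, fun hm => ?_⟩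
      exact absurd (hAt _ hm) (lt_irrefl _)

-- ===== VERDICT (by name: the statement is the Claim_ definition above) =====
theorem sum_u1_u2_spec : Claim_equal_sum_u1_u2 := by
  intro u1 u2 _ hpre
  obtain ⟨h1, h2⟩ := hpre
  unfold Spec_sum_u1_u2 sum_u1_u2 sum_u1_u2_alt
  simp only [cond_eq_mem u1 h1]
  rw [PySem.List.foldl_count_if (fun iv => decide (iv ∈ u1)) u2 0]
  set s1 := PySem.List.sorted u1 (fun kv => kv.1) with hs1
  set s2 := PySem.List.sorted u2 (fun kv => kv.1) with hs2
  have hp1 : s1.Perm u1 := PySem.List.sorted_perm ..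
  have hp2 : s2.Perm u2 := PySem.List.sorted_perm ..
  have hc1 : s1.Pairwise (fun p q => p.1 < q.1) :=
    chain_of_le_nodup s1 (PySem.List.sorted_pairwise ..)
      ((hp1.map Prod.fst).nodup_iff.2 h1)
  have hc2 : s2.Pairwise (fun p q => p.1 < q.1) :=
    chain_of_le_nodup s2 (PySem.List.sorted_pairwise ..)
      ((hp2.map Prod.fst).nodup_iff.2 h2)
  rw [pvMerge_count s1 s2 hc1 hc2]
  have : s2.countP (fun x => decide (x ∈ s1)) = u2.countP (fun x => decide (x ∈ u1)) := by
    rw [hp2.countP_eq]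
    apply List.countP_congr
    intro y _
    simp [hp1.mem_iff]
  rw [this]
  simp
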